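-- pv_equiv track=rewrite | github.com/ulricheck/gst-conan | gst_conan/base.py | groupSoFiles
-- ===== SOURCE A (Python) =====
-- def groupSoFiles(sortedList:list) -> list:
--     '''
--     Groups a list of *.so files into sets.
--
--     Each *.so file can have multiple companions with a version number appended after the `.so` suffix.  The companions
--     can be files or links to files.  For example:
--         libwhatever.so    [symlink --> libwhatever.so.0]
--         libwhatever.so.0  [symlink --> libwhatever.so.0.1234.0]
--         libwhatever.so.0.1234.0
--         libwhatever.so.1  [symlink --> libwhatever.so.1.4321.0]
--         libwhatever.so.1.4321.0
--
--     The companions of each *.so file are grouped such that the members of each group share a common character sequence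
--     prior to ".so".
--
--     :param sortedList:  A list of filenames which has been sorted alphabetically.
--     :return: A list of lists.  Each inner list is a single grouping of *.so files.
--     '''
--
--     output = []
--     thisGroup = []
--     thisPrefix = None
--
--     for item in sortedList:
--         if thisPrefix == None:
--             idx = item.find(".so")
--             thisPrefix = item[:idx]
--             thisGroup = [item]
--         elif item.startswith(thisPrefix):
--             thisGroup.append(item)
--         else:
--             output.append(thisGroup)
--             idx = item.find(".so")
--             thisPrefix = item[:idx]
--             thisGroup = [item]
--
--     if len(thisGroup) > 0:
--         output.append(thisGroup)
--
--     return output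
-- ===== SOURCE B (Python) =====
-- def groupSoFiles(sortedList: list) -> list:
--     '''
--     Groups a sorted list of *.so filenames into runs: each group leader
--     determines a prefix (text before ".so"), and the run extends while
--     items start with that prefix.
--     '''
--     output = []
--     rest = sortedList
--     while rest:
--         leader = rest[0]
--         prefix = leader[:leader.find(".so")]
--         run, rest = _span(prefix, rest[1:])
--         output.append([leader] + run)
--     return output
--
--
-- def _span(prefix, items):
--     '''Split items into the longest leading run starting with prefix, and the remainder.'''
--     for k, it in enumerate(items):
--         if not it.startswith(prefix):
--             return items[:k], items[k:]
--     return items, []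
-- ===== Notes on version B (the rewrite author's own statement) =====
-- stated objective: simpler
-- what changed: Replaces A's thisPrefix/thisGroup state machine with post-loop flush by explicit run-slicing: each iteration takes the group leader, spans the longest following run matching its pre-.so prefix, and appends that whole slice at once.
import Mathlib
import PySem

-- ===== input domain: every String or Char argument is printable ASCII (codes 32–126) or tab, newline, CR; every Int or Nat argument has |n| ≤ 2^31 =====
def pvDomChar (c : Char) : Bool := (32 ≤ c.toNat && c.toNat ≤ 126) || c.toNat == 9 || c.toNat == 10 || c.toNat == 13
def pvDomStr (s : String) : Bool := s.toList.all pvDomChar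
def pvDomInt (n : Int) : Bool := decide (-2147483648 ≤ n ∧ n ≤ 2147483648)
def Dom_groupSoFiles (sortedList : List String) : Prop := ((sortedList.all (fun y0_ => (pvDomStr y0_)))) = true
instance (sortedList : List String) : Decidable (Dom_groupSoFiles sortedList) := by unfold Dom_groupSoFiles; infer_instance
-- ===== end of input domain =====

-- ===== PORT A =====

-- B changes the decomposition: run-slicing per group leader instead of a prefix/group state machine; objective: simpler.

-- ===== PORT A =====
def groupSoFilesStep (st : List (List String) × List String × Option String) (item : String) :
    List (List String) × List String × Option String :=
  match st with
  | (output, _thisGroup, none) =>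
      (output, [item], some (PySem.Str.slice item none (some (PySem.Str.find item ".so"))))
  | (output, thisGroup, some p) =>
      if PySem.Str.startswith item p then
        (output, thisGroup ++ [item], some p)
      else
        (output ++ [thisGroup], [item],
          some (PySem.Str.slice item none (some (PySem.Str.find item ".so"))))

def groupSoFiles (sortedList : List String) : List (List String) :=
  let st := sortedList.foldl groupSoFilesStep ([], [], none)
  if st.2.1.length > 0 then st.1 ++ [st.2.1] else st.1

-- ===== PORT B =====
-- _span: longest leading run of items starting with prefix, and the remainder
def groupSoFilesSpan (pre : String) : List String → List String × List String
  | [] => ([], [])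
  | it :: items =>
      if PySem.Str.startswith it pre then
        let r := groupSoFilesSpan pre items
        (it :: r.1, r.2)
      else
        ([], it :: items)

theorem groupSoFilesSpan_rest_le (pre : String) (items : List String) :
    (groupSoFilesSpan pre items).2.length ≤ items.length := by
  induction items with
  | nil => simp [groupSoFilesSpan]
  | cons x xs ih =>
      simp only [groupSoFilesSpan]
      split
      · simpa using Nat.le_succ_of_le ih
      · simp

def groupSoFiles_alt (sortedList : List String) : List (List String) :=
  match sortedList with
  | [] => []
  | leader :: rest =>
      let pre := PySem.Str.slice leader none (some (PySem.Str.find leader ".so"))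
      let sr := groupSoFilesSpan pre rest
      (leader :: sr.1) :: groupSoFiles_alt sr.2
termination_by sortedList.length
decreasing_by
  simpa using Nat.lt_succ_of_le (groupSoFilesSpan_rest_le _ _)

-- ===== PRECONDITION & SPEC =====
def Spec_groupSoFiles (sortedList : List String) (out : List (List String)) : Prop := out = groupSoFiles_alt sortedList
instance (sortedList : List String) (out : List (List String)) : Decidable (Spec_groupSoFiles sortedList out) := by unfold Spec_groupSoFiles; infer_instance

-- ===== CLAIM =====
def Claim_equal_groupSoFiles : Prop := ∀ (sortedList : List String), Dom_groupSoFiles sortedList → Spec_groupSoFiles sortedList (groupSoFiles sortedList)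

-- ===== LEMMAS AND PROOFS =====
def groupSoFilesFlush (st : List (List String) × List String × Option String) : List (List String) :=
  if st.2.1.length > 0 then st.1 ++ [st.2.1] else st.1

theorem groupSoFiles_inv (rest : List String) :
    ∀ (out : List (List String)) (g : List String) (p : String), g ≠ [] →
      groupSoFilesFlush (rest.foldl groupSoFilesStep (out, g, some p)) =
        out ++ ((g ++ (groupSoFilesSpan p rest).1) :: groupSoFiles_alt (groupSoFilesSpan p rest).2) := by
  induction rest with
  | nil =>
      intro out g p hg
      simp [groupSoFilesSpan, groupSoFilesFlush, groupSoFiles_alt,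
        List.length_pos_iff, hg]
  | cons x xs ih =>
      intro out g p hg
      simp only [List.foldl_cons, groupSoFilesStep, groupSoFilesSpan]
      by_cases h : PySem.Str.startswith x p
      · simp only [h, if_true]
        rw [ih out (g ++ [x]) p (by simp)]
        simp
      · simp only [h, if_false, Bool.false_eq_true]
        rw [ih (out ++ [g]) [x]
          (PySem.Str.slice x none (some (PySem.Str.find x ".so"))) (by simp)]
        conv_rhs => rw [groupSoFiles_alt]
        simp

theorem groupSoFiles_eq_alt (sortedList : List String) :
    groupSoFiles sortedList = groupSoFiles_alt sortedList := by
  cases sortedList with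
  | nil => simp [groupSoFiles, groupSoFiles_alt]
  | cons x xs =>
      show groupSoFilesFlush ((x :: xs).foldl groupSoFilesStep ([], [], none)) = _
      simp only [List.foldl_cons, groupSoFilesStep]
      rw [groupSoFiles_inv xs [] [x] _ (by simp)]
      conv_rhs => rw [groupSoFiles_alt]
      simp

-- ===== VERDICT =====
theorem groupSoFiles_spec : Claim_equal_groupSoFiles := by
  intro sortedList _
  exact groupSoFiles_eq_alt sortedList
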